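-- pv_equiv track=rewrite | github.com/aaron031291/Ghost_terminal | Grace_core/Auto generator/Learning.py | _fix_missing_closing_delimiter
-- ===== SOURCE A (Python) =====
-- def _fix_missing_closing_delimiter(code: str) -> str:
--     """Fix missing closing delimiters (parentheses, brackets, braces).
--
--     Args:
--         code: Original code
--
--     Returns:
--         Fixed code
--     """
--     # Count opening and closing delimiters
--     delimiters = {
--         '(': ')',
--         '[': ']',
--         '{': '}',
--     }
--
--     counts = {char: 0 for char in delimiters.keys() | delimiters.values()}
--
--     for char in code:
--         if char in counts:
--             counts[char] += 1
--
--     # Add missing closing delimiters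
--     fixed_code = code
--     for opener, closer in delimiters.items():
--         missing = counts[opener] - counts[closer]
--         if missing > 0:
--             fixed_code += closer * missing
--
--     return fixed_code
-- ===== SOURCE B (Python) =====
-- def _first_missing_closer(code: str):
--     """Return the closer of the first delimiter pair still unbalanced, or None."""
--     for opener, closer in (('(', ')'), ('[', ']'), ('{', '}')):
--         if code.count(opener) > code.count(closer):
--             return closer
--     return None
--
--
-- def _fix_missing_closing_delimiter(code: str) -> str:
--     """Repair to a fixed point: append one missing closer at a time until balanced."""
--     while True:
--         closer = _first_missing_closer(code)
--         if closer is None: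
--             return code
--         code += closer
-- ===== Notes on version B (the rewrite author's own statement) =====
-- stated objective: alternative
-- what changed: Replaced A's one-shot scheme (fill a six-key count table in one scan, then append closer*(opens-closes) per pair) with a fixed-point repair loop that recounts the current string and appends ONE missing closer per iteration until no pair is unbalanced.
import Mathlib
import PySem

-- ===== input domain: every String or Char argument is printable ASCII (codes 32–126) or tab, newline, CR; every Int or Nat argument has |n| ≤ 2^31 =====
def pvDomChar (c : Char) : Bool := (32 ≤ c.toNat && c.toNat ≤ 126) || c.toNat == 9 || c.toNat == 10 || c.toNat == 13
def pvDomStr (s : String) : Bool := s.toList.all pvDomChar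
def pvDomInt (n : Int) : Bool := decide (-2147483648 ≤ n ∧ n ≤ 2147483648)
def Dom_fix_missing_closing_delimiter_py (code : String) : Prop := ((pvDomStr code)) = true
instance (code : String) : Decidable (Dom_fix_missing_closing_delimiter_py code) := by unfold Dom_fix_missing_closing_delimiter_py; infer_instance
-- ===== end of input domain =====

-- B replaces A's one-shot count-table-and-append with a fixed-point repair loop that
-- recounts the string and appends ONE missing closer per iteration until balanced.

-- ===== PORT A =====
-- literal port of A: build the counts dict over keys() | values(), one counting loop
-- with a membership guard, then append `closer * missing` per pair in dict order.
def fix_missing_closing_delimiter_py (code : String) : String :=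
  let delimiters : PySem.Dict Char Char := PySem.Dict.ofList [('(', ')'), ('[', ']'), ('{', '}')]
  let counts0 : PySem.Dict Char Int :=
    (PySem.Set.union (PySem.Set.ofList delimiters.keys) (PySem.Set.ofList delimiters.values)).foldl
      (fun d c => d.insert c 0) PySem.Dict.empty
  let counts : PySem.Dict Char Int :=
    code.toList.foldl (fun d c => if d.contains c then d.modify c 0 (· + 1) else d) counts0
  delimiters.items.foldl
    (fun fixed p =>
      let missing : Int := counts.getD p.1 0 - counts.getD p.2 0
      if missing > 0 then fixed ++ String.ofList (List.replicate missing.toNat p.2) else fixed)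
    code

-- ===== PORT B =====
-- str.count with a one-character needle is the plain character count (needed by the
-- termination proof of the port of Source B's while-loop, hence stated here).
theorem count_go_single (c : Char) : ∀ (s : List Char) (fuel acc : Nat), s.length ≤ fuel →
    PySem.Chars.count.go [c] fuel s acc = acc + s.count c := by
  intro s
  induction s with
  | nil => intro fuel acc _; cases fuel <;> simp [PySem.Chars.count.go]
  | cons h t ih =>
    intro fuel acc hf
    cases fuel with
    | zero => simp at hf
    | succ f =>
      simp only [List.length_cons] at hf
      by_cases hc : c = h
      · subst hc
        simp only [PySem.Chars.count.go, List.isPrefixOf, BEq.rfl, Bool.and_true, if_pos,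
          List.length_singleton, List.drop_one, List.tail_cons]
        rw [ih f (acc + 1) (by omega), List.count_cons]
        simp; omega
      · have hb : (c == h) = false := by simp [hc]
        simp only [PySem.Chars.count.go, List.isPrefixOf, hb, Bool.false_and, if_neg,
          Bool.false_eq_true, not_false_iff]
        rw [ih f acc (by omega), List.count_cons]
        simp [Ne.symm hc]

theorem count_single (s : List Char) (c : Char) : PySem.Chars.count s [c] = s.count c := by
  simp only [PySem.Chars.count, List.isEmpty_cons, if_neg, Bool.false_eq_true, not_false_iff]
  rw [count_go_single c s s.length 0 le_rfl]; omega

theorem strcount_lit (s : String) (c : Char) (t : String) (ht : t.toList = [c]) :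
    PySem.Str.count s t = s.toList.count c := by
  rw [PySem.Str.count_eq, ht, count_single]

-- literal port of Source B's helper: the for-loop over the three pairs is this if-chain,
-- str.count = PySem.Str.count on the current string; None = none.
def pvFirstMissingCloser (code : String) : Option Char :=
  if PySem.Str.count code "(" > PySem.Str.count code ")" then some ')'
  else if PySem.Str.count code "[" > PySem.Str.count code "]" then some ']'
  else if PySem.Str.count code "{" > PySem.Str.count code "}" then some '}'
  else none

-- termination measure of Source B's while-loop: total number of missing closers
def pvTotalMissing (code : String) : Nat :=
  (code.toList.count '(' - code.toList.count ')')
  + (code.toList.count '[' - code.toList.count ']')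
  + (code.toList.count '{' - code.toList.count '}')

-- literal port of Source B's while-loop: append the first missing closer until none is left.
def fix_missing_closing_delimiter_py_alt (code : String) : String :=
  match h : pvFirstMissingCloser code with
  | none => code
  | some c => fix_missing_closing_delimiter_py_alt (code ++ String.ofList [c])
termination_by pvTotalMissing code
decreasing_by
  · simp only [pvFirstMissingCloser,
      strcount_lit _ '(' "(" (by decide), strcount_lit _ ')' ")" (by decide),
      strcount_lit _ '[' "[" (by decide), strcount_lit _ ']' "]" (by decide),
      strcount_lit _ '{' "{" (by decide), strcount_lit _ '}' "}" (by decide)] at h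
    split_ifs at h with h1 h2 h3
    all_goals
      injection h with hc
      subst hc
      simp [pvTotalMissing, String.toList_append, List.count_append]
      omega

-- ===== PRECONDITION & SPEC =====
def Spec_fix_missing_closing_delimiter_py (code : String) (out : String) : Prop := out = fix_missing_closing_delimiter_py_alt code
instance (code : String) (out : String) : Decidable (Spec_fix_missing_closing_delimiter_py code out) := by unfold Spec_fix_missing_closing_delimiter_py; infer_instance

-- ===== CLAIM (what is proved, stated in full; the proofs are below) =====
def Claim_equal_fix_missing_closing_delimiter_py : Prop := ∀ (code : String), Dom_fix_missing_closing_delimiter_py code → Spec_fix_missing_closing_delimiter_py code (fix_missing_closing_delimiter_py code)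

-- ===== LEMMAS AND PROOFS =====

-- closed form of B's repair loop: it appends exactly the missing closers, grouped ( ] }
theorem alt_closed_form (code : String) :
    fix_missing_closing_delimiter_py_alt code =
      code ++ String.ofList
        (List.replicate (code.toList.count '(' - code.toList.count ')') ')'
          ++ List.replicate (code.toList.count '[' - code.toList.count ']') ']'
          ++ List.replicate (code.toList.count '{' - code.toList.count '}') '}') := by
  induction code using fix_missing_closing_delimiter_py_alt.induct with
  | case1 code h =>
    rw [fix_missing_closing_delimiter_py_alt, h]
    simp only [pvFirstMissingCloser,
      strcount_lit _ '(' "(" (by decide), strcount_lit _ ')' ")" (by decide),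
      strcount_lit _ '[' "[" (by decide), strcount_lit _ ']' "]" (by decide),
      strcount_lit _ '{' "{" (by decide), strcount_lit _ '}' "}" (by decide)] at h
    split_ifs at h with h1 h2 h3
    have e1 : code.toList.count '(' - code.toList.count ')' = 0 := by omega
    have e2 : code.toList.count '[' - code.toList.count ']' = 0 := by omega
    have e3 : code.toList.count '{' - code.toList.count '}' = 0 := by omega
    simp [e1, e2, e3]
  | case2 code c h ih =>
    rw [fix_missing_closing_delimiter_py_alt, h]
    change fix_missing_closing_delimiter_py_alt (code ++ String.ofList [c]) = _
    rw [ih]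
    simp only [pvFirstMissingCloser,
      strcount_lit _ '(' "(" (by decide), strcount_lit _ ')' ")" (by decide),
      strcount_lit _ '[' "[" (by decide), strcount_lit _ ']' "]" (by decide),
      strcount_lit _ '{' "{" (by decide), strcount_lit _ '}' "}" (by decide)] at h
    apply String.toList_inj.mp
    split_ifs at h with h1 h2 h3 <;> injection h with hc <;> subst hc <;>
      simp [String.toList_append, List.count_append]
    · rw [show List.count '(' code.toList - List.count ')' code.toList
            = (List.count '(' code.toList - (List.count ')' code.toList + 1)) + 1 from by omega,
          List.replicate_succ]
      simp
    · rw [show List.count '(' code.toList - List.count ')' code.toList = 0 from by omega,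
          show List.count '[' code.toList - List.count ']' code.toList
            = (List.count '[' code.toList - (List.count ']' code.toList + 1)) + 1 from by omega,
          List.replicate_succ]
      simp
    · rw [show List.count '(' code.toList - List.count ')' code.toList = 0 from by omega,
          show List.count '[' code.toList - List.count ']' code.toList = 0 from by omega,
          show List.count '{' code.toList - List.count '}' code.toList
            = (List.count '{' code.toList - (List.count '}' code.toList + 1)) + 1 from by omega,
          List.replicate_succ]
      simp

-- A's guarded counting loop: getD of a key present from the start is its initial value
-- plus the character count.
theorem foldGuard_getD (v : Char) (l : List Char) :
    ∀ (d : PySem.Dict Char Int), d.contains v = true →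
    ((l.foldl (fun d c => if d.contains c then d.modify c 0 (· + 1) else d) d).getD v 0)
      = d.getD v 0 + l.count v := by
  induction l with
  | nil => intro d _; simp
  | cons c t ih =>
    intro d hv
    simp only [List.foldl_cons]
    by_cases hc : d.contains c = true
    · rw [if_pos hc]
      have hv' : (d.modify c 0 (· + 1)).contains v = true := by
        rw [PySem.Dict.contains_modify]; simp [hv]
      rw [ih _ hv', PySem.Dict.getD_modify, List.count_cons]
      by_cases hvc : v = c
      · simp [hvc]; omega
      · simp [hvc, Ne.symm hvc]
    · rw [if_neg hc]
      have hvc : v ≠ c := by intro h; exact hc (h ▸ hv)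
      rw [ih d hv, List.count_cons]
      simp [Ne.symm hvc]

theorem counts0_getD (v : Char) (hv : v ∈ (['(', ')', '[', ']', '{', '}'] : List Char)) :
    (List.foldl (fun d c => d.insert c 0) PySem.Dict.empty
      ((PySem.Set.ofList (PySem.Dict.ofList [('(', ')'), ('[', ']'), ('{', '}')]).keys).union
        (PySem.Set.ofList (PySem.Dict.ofList [('(', ')'), ('[', ']'), ('{', '}')]).values))).getD v 0
      = (0 : Int) := by
  fin_cases hv <;> decide

-- ===== VERDICT (by name: the statement is the Claim_ definition above) =====
theorem fix_missing_closing_delimiter_py_spec : Claim_equal_fix_missing_closing_delimiter_py := by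
  intro code _
  unfold Spec_fix_missing_closing_delimiter_py
  rw [alt_closed_form]
  simp only [fix_missing_closing_delimiter_py]
  rw [show (PySem.Dict.ofList [('(', ')'), ('[', ']'), ('{', '}')]).items
        = [('(', ')'), ('[', ']'), ('{', '}')] from rfl]
  simp only [List.foldl_cons, List.foldl_nil]
  rw [foldGuard_getD '(' code.toList _ (by decide),
      foldGuard_getD ')' code.toList _ (by decide),
      foldGuard_getD '[' code.toList _ (by decide),
      foldGuard_getD ']' code.toList _ (by decide),
      foldGuard_getD '{' code.toList _ (by decide),
      foldGuard_getD '}' code.toList _ (by decide)]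
  rw [counts0_getD '(' (by decide), counts0_getD ')' (by decide),
      counts0_getD '[' (by decide), counts0_getD ']' (by decide),
      counts0_getD '{' (by decide), counts0_getD '}' (by decide)]
  norm_num
  apply String.toList_inj.mp
  simp only [String.toList_append, String.toList_ofList]
  split_ifs with h1 h2 h3 <;>
    simp [String.toList_append, String.toList_ofList] <;>
    (try constructor) <;>
    (try rw [show List.count '(' code.toList - List.count ')' code.toList = 0 from by omega]) <;>
    (try rw [show List.count '[' code.toList - List.count ']' code.toList = 0 from by omega]) <;>
    (try rw [show List.count '{' code.toList - List.count '}' code.toList = 0 from by omega]) <;>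
    (try simp)
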